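-- pv_equiv track=rewrite | github.com/TrekkersOrg/ml-api | unit_helpers.py | simplify_response
-- ===== SOURCE A (Python) =====
-- def simplify_response(issue_list):
--     sorted_issues = sorted(issue_list, key=lambda x: x[0])
--     seen_lines = set()
--     unique_line_numbers = []
--     for issue in sorted_issues:
--         line_number = issue[0]
--         if line_number not in seen_lines:
--             unique_line_numbers.append(line_number)
--             seen_lines.add(line_number)
--     return unique_line_numbers
-- ===== SOURCE B (Python) =====
-- def simplify_response(issue_list):
--     return sorted({issue[0] for issue in issue_list})
-- ===== Notes on version B (the rewrite author's own statement) =====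
-- stated objective: idiomatic
-- what changed: B builds the set of distinct first elements with a comprehension and sorts that set once, instead of A's sort-the-whole-list-by-key followed by a manual dedup loop with a seen-set.
import Mathlib
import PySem

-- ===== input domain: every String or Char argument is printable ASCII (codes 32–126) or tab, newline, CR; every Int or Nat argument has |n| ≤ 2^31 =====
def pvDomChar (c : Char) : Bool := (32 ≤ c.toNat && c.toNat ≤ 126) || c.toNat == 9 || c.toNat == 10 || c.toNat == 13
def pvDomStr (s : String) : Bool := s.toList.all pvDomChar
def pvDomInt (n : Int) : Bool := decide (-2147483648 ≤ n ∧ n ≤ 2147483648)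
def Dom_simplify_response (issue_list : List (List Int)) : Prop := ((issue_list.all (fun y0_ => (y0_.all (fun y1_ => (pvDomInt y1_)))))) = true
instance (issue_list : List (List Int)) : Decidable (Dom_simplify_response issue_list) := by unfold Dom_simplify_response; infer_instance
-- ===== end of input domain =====

-- B replaces A's sort-then-manual-dedup-loop by "sort the set of first elements" (more idiomatic; same values).


-- issue[0] on a (guaranteed nonempty, by Pre_) inner list
def pvHead (issue : List Int) : Int := (PySem.List.pyGet? issue 0).getD 0

-- ===== PORT A =====
def simplify_response (issue_list : List (List Int)) : List Int :=
  let sorted_issues := PySem.List.sorted issue_list (fun x => pvHead x) false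
  (sorted_issues.foldl
    (fun (st : PySem.Set Int × List Int) issue =>
      let line_number := pvHead issue
      if st.1.contains line_number then st
      else (PySem.Set.add st.1 line_number, st.2 ++ [line_number]))
    (PySem.Set.empty, [])).2

-- ===== PORT B =====
def simplify_response_alt (issue_list : List (List Int)) : List Int :=
  PySem.List.sorted (PySem.Set.ofList (issue_list.map (fun issue => pvHead issue))) (fun x => x) false

-- ===== PRECONDITION & SPEC =====
-- Pre_ excludes exactly the inputs on which the Python A raises IndexError (an empty inner list).
def Pre_simplify_response (issue_list : List (List Int)) : Prop :=
  ∀ issue ∈ issue_list, issue ≠ []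
instance (issue_list : List (List Int)) : Decidable (Pre_simplify_response issue_list) := by unfold Pre_simplify_response; infer_instance
def pvWitness_simplify_response : List (List Int) := [[3, 1], [1, 2], [3, 5], [2, 0]]

def Spec_simplify_response (issue_list : List (List Int)) (out : List Int) : Prop := out = simplify_response_alt issue_list
instance (issue_list : List (List Int)) (out : List Int) : Decidable (Spec_simplify_response issue_list out) := by unfold Spec_simplify_response; infer_instance

-- ===== CLAIM (what is proved, stated in full; the proofs are below) =====
def Claim_equal_simplify_response : Prop := ∀ (issue_list : List (List Int)), Dom_simplify_response issue_list → Pre_simplify_response issue_list → Spec_simplify_response issue_list (simplify_response issue_list)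

-- ===== LEMMAS AND PROOFS =====

-- the dedup loop carries seen = acc (as lists): it is foldl Set.add over the heads
lemma loop_eq_foldl_add (l : List (List Int)) (s : List Int) :
    (l.foldl
      (fun (st : PySem.Set Int × List Int) issue =>
        let line_number := pvHead issue
        if st.1.contains line_number then st
        else (PySem.Set.add st.1 line_number, st.2 ++ [line_number]))
      (s, s)).2 = (l.map pvHead).foldl PySem.Set.add s := by
  induction l generalizing s with
  | nil => rfl
  | cons x t ih =>
      simp only [List.foldl_cons, List.map_cons]
      by_cases h : pvHead x ∈ s
      · simpa [PySem.Set.add, h] using ih s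
      · simpa [PySem.Set.add, h] using ih (s ++ [pvHead x])

-- foldl Set.add over a weakly-increasing list yields a strictly increasing list
lemma foldl_add_pairwise_lt (l s : List Int)
    (hs : s.Pairwise (· < ·))
    (hls : ∀ a ∈ s, ∀ b ∈ l, a ≤ b)
    (hl : l.Pairwise (· ≤ ·)) :
    (l.foldl PySem.Set.add s).Pairwise (· < ·) := by
  induction l generalizing s with
  | nil => exact hs
  | cons x t ih =>
      simp only [List.foldl_cons]
      rcases List.pairwise_cons.mp hl with ⟨hx, ht⟩
      by_cases h : x ∈ s
      · have : PySem.Set.add s x = s := by simp [PySem.Set.add, h]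
        rw [this]
        exact ih s hs (fun a ha b hb => hls a ha b (List.mem_cons_of_mem _ hb)) ht
      · have hadd : PySem.Set.add s x = s ++ [x] := by simp [PySem.Set.add, h]
        rw [hadd]
        have hxs : x ∉ s := h
        apply ih
        · refine List.pairwise_append.mpr ⟨hs, List.pairwise_singleton _ _, ?_⟩
          intro a ha b hb
          rcases List.mem_singleton.mp hb with rfl
          have hle : a ≤ b := hls a ha b (List.mem_cons_self)
          have hne : a ≠ b := fun hab => hxs (hab ▸ ha)
          omega
        · intro a ha b hb
          rcases List.mem_append.mp ha with ha' | ha'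
          · exact hls a ha' b (List.mem_cons_of_mem _ hb)
          · rcases List.mem_singleton.mp ha' with rfl
            exact hx b hb
        · exact ht

theorem simplify_response_eq (issue_list : List (List Int)) :
    simplify_response issue_list = simplify_response_alt issue_list := by
  unfold simplify_response simplify_response_alt
  set key : List Int → Int := fun x => pvHead x with hkey
  set srt := PySem.List.sorted issue_list key false with hsrt
  have hloop :
      (srt.foldl
        (fun (st : PySem.Set Int × List Int) issue =>
          let line_number := pvHead issue
          if st.1.contains line_number then st
          else (PySem.Set.add st.1 line_number, st.2 ++ [line_number]))
        (PySem.Set.empty, [])).2 = PySem.Set.ofList (srt.map pvHead) := by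
    have := loop_eq_foldl_add srt []
    simpa [PySem.Set.empty, PySem.Set.ofList_eq_foldl] using this
  simp only [hloop]
  -- name the result: it is a strictly increasing rearrangement of ofList (map pvHead issue_list)
  apply Eq.symm
  apply PySem.List.sorted_eq_of_perm_of_pairwise_lt
  · -- Perm
    have hperm : (srt.map pvHead).Perm (issue_list.map pvHead) :=
      (PySem.List.sorted_perm issue_list key false).map pvHead
    refine (List.perm_ext_iff_of_nodup (PySem.Set.nodup_ofList _) (PySem.Set.nodup_ofList _)).mpr ?_
    intro a
    simp only [PySem.Set.mem_ofList]
    exact ⟨fun h => hperm.mem_iff.mp h, fun h => hperm.mem_iff.mpr h⟩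
  · -- Pairwise (· < ·)
    rw [PySem.Set.ofList_eq_foldl]
    apply foldl_add_pairwise_lt _ _ List.Pairwise.nil (by simp)
    simpa [hkey] using PySem.List.sorted_map_key_pairwise issue_list key

-- ===== VERDICT (by name: the statement is the Claim_ definition above) =====
theorem simplify_response_spec : Claim_equal_simplify_response := by
  intro issue_list _ _
  unfold Spec_simplify_response
  exact simplify_response_eq issue_list
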